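-- pv_equiv track=rewrite | github.com/karolisd4/vbe-python | 2021/pagrindine/2021U2.py | rusiuoti
-- ===== SOURCE A (Python) =====
-- def rusiuoti(mok_duom):
--     rez_duom = {}
--     mok_skaiciai = []
--
--     for mokinys in mok_duom.items():
--         mok_skaiciai.append(len(mokinys[1]))
--         mok_duom[mokinys[0]].insert(0, len(mokinys[1]))
--
--     for mok_skaicius in mok_skaiciai:
--         for i in sorted(mok_duom):
--             if mok_duom[i][0] == mok_skaicius:
--                 rez_duom.setdefault(i, (mok_duom[i][0], mok_duom[i][1:]))
--
--     return rez_duom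
-- ===== SOURCE B (Python) =====
-- def rusiuoti(mok_duom):
--     rank = {}
--     for v in mok_duom.values():
--         n = len(v)
--         if n not in rank:
--             rank[n] = len(rank)
--     keys = sorted(mok_duom, key=lambda k: (rank[len(mok_duom[k])], k))
--     return {k: (len(mok_duom[k]), list(mok_duom[k])) for k in keys}
-- ===== Notes on version B (the rewrite author's own statement) =====
-- stated objective: faster
-- what changed: A rescans the alphabetically sorted key list once per entry of the (duplicated) counts list, relying on setdefault to drop repeats; B builds a first-appearance rank table for the distinct counts in one pass and emits the result with a single sort by the composite key (rank of count, key); B does not mutate its argument (A inserts each count at the front of the value lists).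
import Mathlib
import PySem

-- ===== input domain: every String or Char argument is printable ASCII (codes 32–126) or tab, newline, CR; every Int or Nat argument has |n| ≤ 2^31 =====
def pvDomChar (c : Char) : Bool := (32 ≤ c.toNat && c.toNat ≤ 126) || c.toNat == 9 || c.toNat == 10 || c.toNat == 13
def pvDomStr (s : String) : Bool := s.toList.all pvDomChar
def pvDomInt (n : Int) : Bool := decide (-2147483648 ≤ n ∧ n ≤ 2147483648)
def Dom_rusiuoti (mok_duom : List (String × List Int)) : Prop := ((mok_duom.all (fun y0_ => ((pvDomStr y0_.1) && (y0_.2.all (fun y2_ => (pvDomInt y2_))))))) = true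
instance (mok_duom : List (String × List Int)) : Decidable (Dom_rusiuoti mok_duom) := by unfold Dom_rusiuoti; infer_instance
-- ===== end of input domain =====

-- B groups the keys with ONE composite-key sort (first-appearance rank of the count, then key)
-- instead of A's rescan of the sorted keys for every count; equivalence is about the RETURN value
-- only: A mutates its argument (inserts each count at the front of the value list), B does not.

-- ===== PORT A =====
def rusiuoti (mok_duom : List (String × List Int)) : List (String × Int × List Int) :=
  let d0 : PySem.Dict String (List Int) := PySem.Dict.ofList mok_duom
  -- first loop: iterates the items view; each value is mutated only at its own iteration,
  -- so the snapshot pair (k, v) holds the pre-insert list exactly as Python sees it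
  let st := d0.items.foldl
    (fun (st : PySem.Dict String (List Int) × List Int) mokinys =>
      (st.1.modify mokinys.1 [] (fun xs => PySem.List.insert xs 0 (mokinys.2.length : Int)),
       st.2 ++ [(mokinys.2.length : Int)]))
    (d0, ([] : List Int))
  -- second loop; mok_duom[i] (i a key: no KeyError → getD) and [0] (list nonempty → pyGetD)
  let rez := st.2.foldl
    (fun (rez : PySem.Dict String (Int × List Int)) mok_skaicius =>
      (PySem.List.sorted st.1.keys (fun k => k)).foldl
        (fun rez i =>
          if PySem.List.pyGetD (st.1.getD i []) 0 0 = mok_skaicius then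
            rez.setdefault i (PySem.List.pyGetD (st.1.getD i []) 0 0,
                              PySem.List.slice (st.1.getD i []) (some 1) none)
          else rez)
        rez)
    PySem.Dict.empty
  rez.items

-- ===== PORT B =====
def rusiuoti_alt (mok_duom : List (String × List Int)) : List (String × Int × List Int) :=
  let d : PySem.Dict String (List Int) := PySem.Dict.ofList mok_duom
  let rank : PySem.Dict Int Int := d.values.foldl
    (fun rank v =>
      if rank.contains (v.length : Int) then rank
      else rank.insert (v.length : Int) (rank.size : Int))
    PySem.Dict.empty
  -- rank[len(mok_duom[k])]: k a key and its count is in rank → getD is exact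
  let keys := PySem.List.sorted2 d.keys
    (fun k => rank.getD ((d.getD k []).length : Int) 0) (fun k => k)
  keys.map (fun k => (k, ((d.getD k []).length : Int), d.getD k []))

-- ===== PRECONDITION & SPEC =====
def Spec_rusiuoti (mok_duom : List (String × List Int)) (out : List (String × Int × List Int)) : Prop := out = rusiuoti_alt mok_duom
instance (mok_duom : List (String × List Int)) (out : List (String × Int × List Int)) : Decidable (Spec_rusiuoti mok_duom out) := by unfold Spec_rusiuoti; infer_instance

-- ===== CLAIM (what is proved, stated in full; the proofs are below) =====
def Claim_equal_rusiuoti : Prop := ∀ (mok_duom : List (String × List Int)), Dom_rusiuoti mok_duom → Spec_rusiuoti mok_duom (rusiuoti mok_duom)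

-- ===== LEMMAS AND PROOFS =====

-- Set.update by elements already present is the identity
theorem pv_update_of_subset {α : Type} [BEq α] [LawfulBEq α] (xs : List α) :
    ∀ (s : PySem.Set α), (∀ x ∈ xs, x ∈ s) → PySem.Set.update s xs = s := by
  induction xs with
  | nil => intro s _; rfl
  | cons x xs ih =>
    intro s h
    have hx : PySem.Set.add s x = s := by
      simp [PySem.Set.add, PySem.Set.contains, h x List.mem_cons_self]
    show PySem.Set.update (PySem.Set.add s x) xs = s
    rw [hx]
    exact ih s (fun y hy => h y (List.mem_cons_of_mem _ hy))

-- the first loop, characterised: each stored list gains its length in front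
theorem pv_modfold_getD (l : List (String × List Int)) :
    ∀ (d : PySem.Dict String (List Int)),
      (l.map Prod.fst).Nodup → (∀ p ∈ l, d.getD p.1 [] = p.2) →
      ∀ p ∈ l,
        (l.foldl (fun d q => d.modify q.1 [] (fun xs => PySem.List.insert xs 0 (q.2.length : Int))) d).getD p.1 []
          = (p.2.length : Int) :: p.2 := by
  induction l with
  | nil => intro d _ _ p hp; cases hp
  | cons q t ih =>
    intro d hnd hval p hp
    simp only [List.map_cons, List.nodup_cons] at hnd
    obtain ⟨hq, hnd'⟩ := hnd
    simp only [List.foldl_cons]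
    set d' := d.modify q.1 [] (fun xs => PySem.List.insert xs 0 (q.2.length : Int)) with hd'
    have hval' : ∀ p ∈ t, d'.getD p.1 [] = p.2 := by
      intro p hp'
      rw [hd', PySem.Dict.getD_modify]
      have : p.1 ≠ q.1 := by
        intro hcon; exact hq (hcon ▸ List.mem_map_of_mem hp')
      rw [if_neg this]
      exact hval p (List.mem_cons_of_mem _ hp')
    rcases List.mem_cons.mp hp with hp | hp
    · subst hp
      -- p = q : its key is not modified again in t
      have hq' : ∀ r ∈ t, r.1 ≠ p.1 := by
        intro r hr hcon; exact hq (hcon ▸ List.mem_map_of_mem hr)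
      have hstay : ∀ (l' : List (String × List Int)) (d'' : PySem.Dict String (List Int)),
          (∀ r ∈ l', r.1 ≠ p.1) →
          (l'.foldl (fun d q => d.modify q.1 [] (fun xs => PySem.List.insert xs 0 (q.2.length : Int))) d'').getD p.1 []
            = d''.getD p.1 [] := by
        intro l'
        induction l' with
        | nil => intro d'' _; rfl
        | cons r t' ih' =>
          intro d'' hne
          simp only [List.foldl_cons]
          rw [ih' _ (fun r hr => hne r (List.mem_cons_of_mem _ hr)),
              PySem.Dict.getD_modify, if_neg (Ne.symm (hne r List.mem_cons_self))]
      rw [hstay t d' hq', hd', PySem.Dict.getD_modify, if_pos rfl,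
          hval p List.mem_cons_self, PySem.List.insert_zero]
    · exact ih d' hnd' hval' p hp

-- inner fold (one count) when every key of that count is already present: no-op
theorem pv_innerA (cnt : String → Int) (e : String → Int × List Int) (c : Int) :
    ∀ (S : List String) (rez : PySem.Dict String (Int × List Int)),
      (∀ k ∈ S, cnt k = c → rez.contains k = true) →
      S.foldl (fun rez i => if cnt i = c then rez.setdefault i (e i) else rez) rez = rez := by
  intro S
  induction S with
  | nil => intro rez _; rfl
  | cons i t ih =>
    intro rez h
    simp only [List.foldl_cons]
    have h1 : (if cnt i = c then rez.setdefault i (e i) else rez) = rez := by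
      split_ifs with hc
      · exact PySem.Dict.setdefault_of_contains rez (e i) (h i List.mem_cons_self hc)
      · rfl
    rw [h1]
    exact ih rez (fun k hk => h k (List.mem_cons_of_mem _ hk))

-- inner fold (one count) when no key of that count is present yet: appends the filtered block
theorem pv_innerB (cnt : String → Int) (e : String → Int × List Int) (c : Int) :
    ∀ (S : List String) (rez : PySem.Dict String (Int × List Int)),
      S.Nodup → (∀ k ∈ S, cnt k = c → rez.contains k = false) →
      (S.foldl (fun rez i => if cnt i = c then rez.setdefault i (e i) else rez) rez).items
          = rez.items ++ (S.filter (fun k => decide (cnt k = c))).map (fun k => (k, e k)) ∧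
      ∀ k', ((S.foldl (fun rez i => if cnt i = c then rez.setdefault i (e i) else rez) rez).contains k' = true
               ↔ rez.contains k' = true ∨ (k' ∈ S ∧ cnt k' = c)) := by
  intro S
  induction S with
  | nil => intro rez _ _; exact ⟨by simp, by simp⟩
  | cons i t ih =>
    intro rez hnd h
    simp only [List.foldl_cons]
    rcases List.nodup_cons.mp hnd with ⟨hint, hnd'⟩
    by_cases hc : cnt i = c
    · have hci : rez.contains i = false := h i List.mem_cons_self hc
      have hsd : (if cnt i = c then rez.setdefault i (e i) else rez)
          = rez.insert i (e i) := by
        rw [if_pos hc, PySem.Dict.setdefault_of_not_contains rez (e i) hci]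
      rw [hsd]
      have h' : ∀ k ∈ t, cnt k = c → (rez.insert i (e i)).contains k = false := by
        intro k hk hkc
        rw [PySem.Dict.contains_insert]
        have hne : (k == i) = false := by
          simp only [beq_eq_false_iff_ne, ne_eq]
          intro hcon; exact hint (hcon ▸ hk)
        rw [hne, Bool.false_or]
        exact h k (List.mem_cons_of_mem _ hk) hkc
      obtain ⟨hit, hcont⟩ := ih (rez.insert i (e i)) hnd' h'
      refine ⟨?_, ?_⟩
      · rw [hit, PySem.Dict.items_insert_of_not_contains rez (e i) hci]
        simp [hc]
      · intro k'
        rw [hcont k', PySem.Dict.contains_insert]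
        simp only [Bool.or_eq_true, beq_iff_eq, List.mem_cons]
        constructor
        · rintro ((rfl | hr) | ⟨hm, hcc⟩)
          · exact Or.inr ⟨Or.inl rfl, hc⟩
          · exact Or.inl hr
          · exact Or.inr ⟨Or.inr hm, hcc⟩
        · rintro (hr | ⟨(rfl | hm), hcc⟩)
          · exact Or.inl (Or.inr hr)
          · exact Or.inl (Or.inl rfl)
          · exact Or.inr ⟨hm, hcc⟩
    · rw [if_neg hc]
      obtain ⟨hit, hcont⟩ := ih rez hnd' (fun k hk => h k (List.mem_cons_of_mem _ hk))
      refine ⟨?_, ?_⟩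
      · rw [hit]; simp [hc]
      · intro k'
        rw [hcont k']
        simp only [List.mem_cons]
        constructor
        · rintro (hr | ⟨hm, hcc⟩)
          · exact Or.inl hr
          · exact Or.inr ⟨Or.inr hm, hcc⟩
        · rintro (hr | ⟨(rfl | hm), hcc⟩)
          · exact Or.inl hr
          · exact absurd hcc hc
          · exact Or.inr ⟨hm, hcc⟩

-- outer fold over the (duplicated) counts list = flatMap over the distinct counts
theorem pv_outer (cnt : String → Int) (e : String → Int × List Int) (S : List String) (hS : S.Nodup) :
    ∀ (cs : List Int) (C : List Int) (rez : PySem.Dict String (Int × List Int)),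
      rez.items = C.flatMap (fun c => (S.filter (fun k => decide (cnt k = c))).map (fun k => (k, e k))) →
      (∀ k ∈ S, (rez.contains k = true ↔ cnt k ∈ C)) →
      (cs.foldl (fun rez c => S.foldl (fun rez i => if cnt i = c then rez.setdefault i (e i) else rez) rez) rez).items
        = (PySem.Set.update C cs).flatMap (fun c => (S.filter (fun k => decide (cnt k = c))).map (fun k => (k, e k))) := by
  intro cs
  induction cs with
  | nil => intro C rez h1 _; exact h1
  | cons c cs ih =>
    intro C rez h1 h2
    simp only [List.foldl_cons]
    rw [show PySem.Set.update C (c :: cs) = PySem.Set.update (PySem.Set.add C c) cs from rfl]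
    by_cases hcC : c ∈ C
    · have hadd : PySem.Set.add C c = C := by
        simp [PySem.Set.add, PySem.Set.contains, hcC]
      rw [pv_innerA cnt e c S rez (fun k _ hkc => (h2 k ‹k ∈ S›).mpr (hkc ▸ hcC)), hadd]
      exact ih C rez h1 h2
    · have hadd : PySem.Set.add C c = C ++ [c] := by
        simp [PySem.Set.add, PySem.Set.contains, hcC]
      have h' : ∀ k ∈ S, cnt k = c → rez.contains k = false := by
        intro k hk hkc
        by_contra hcon
        have := (h2 k hk).mp (Bool.of_not_eq_false hcon)
        exact hcC (hkc ▸ this)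
      obtain ⟨hit, hcont⟩ := pv_innerB cnt e c S rez hS h'
      rw [hadd]
      refine ih (C ++ [c]) _ ?_ ?_
      · rw [hit, h1]
        simp
      · intro k hk
        rw [hcont k, h2 k hk]
        simp only [List.mem_append, List.mem_singleton]
        constructor
        · rintro (hr | ⟨_, hcc⟩)
          · exact Or.inl hr
          · exact Or.inr hcc
        · rintro (hr | hcc)
          · exact Or.inl hr
          · exact Or.inr ⟨hk, hcc⟩

-- the rank dict, characterised: position of each distinct count in first-appearance order
theorem pv_rankfold :
    ∀ (cs : List Int) (r : PySem.Dict Int Int) (D : List Int), D.Nodup →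
      r.keys = D → (∀ c ∈ D, r.getD c 0 = (D.idxOf c : Int)) →
      let r' := cs.foldl (fun r c => if r.contains c then r else r.insert c (r.size : Int)) r
      r'.keys = PySem.Set.update D cs ∧
        (∀ c ∈ PySem.Set.update D cs, r'.getD c 0 = ((PySem.Set.update D cs).idxOf c : Int)) := by
  intro cs
  induction cs with
  | nil => intro r D _ hk hg; exact ⟨hk, hg⟩
  | cons c cs ih =>
    intro r D hnd hk hg
    simp only [List.foldl_cons]
    rw [show PySem.Set.update D (c :: cs) = PySem.Set.update (PySem.Set.add D c) cs from rfl]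
    by_cases hcD : c ∈ D
    · have hco : r.contains c = true := (PySem.Dict.contains_iff_mem_keys r c).mpr (hk ▸ hcD)
      have hadd : PySem.Set.add D c = D := by
        simp [PySem.Set.add, PySem.Set.contains, hcD]
      rw [if_pos hco, hadd]
      simpa using ih r D hnd hk hg
    · have hco : r.contains c = false := by
        by_contra hcon
        exact hcD (hk ▸ (PySem.Dict.contains_iff_mem_keys r c).mp (Bool.of_not_eq_false hcon))
      have hadd : PySem.Set.add D c = D ++ [c] := by
        simp [PySem.Set.add, PySem.Set.contains, hcD]
      rw [if_neg (by simp [hco]), hadd]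
      have hIH := ih (r.insert c (r.size : Int)) (D ++ [c])
      have hsz : r.size = D.length := by
        have := congrArg List.length hk
        simpa [PySem.Dict.keys, PySem.Dict.size] using this
      refine (fun a b c' => by simpa using hIH a b c' :
        _ → _ → _ → (List.foldl _ (r.insert c (r.size : Int)) cs).keys = PySem.Set.update (D ++ [c]) cs ∧
          ∀ x ∈ PySem.Set.update (D ++ [c]) cs,
            (List.foldl _ (r.insert c (r.size : Int)) cs).getD x 0 = ((PySem.Set.update (D ++ [c]) cs).idxOf x : Int)) ?_ ?_ ?_
      · simp only [List.nodup_append, List.nodup_singleton, true_and]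
        refine ⟨hnd, ?_⟩
        intro a ha b hb
        have hb' : b = c := List.mem_singleton.mp hb
        intro hac
        exact hcD (hb' ▸ hac ▸ ha)
      · rw [PySem.Dict.keys_insert_of_not_contains r _ hco, hk]
      · intro c' hc'
        rcases List.mem_append.mp hc' with hm | hm
        · have hne : c' ≠ c := fun hcon => hcD (hcon ▸ hm)
          rw [PySem.Dict.getD_insert, if_neg hne, hg c' hm,
              List.idxOf_append, if_pos hm]
        · have : c' = c := List.mem_singleton.mp hm
          subst this
          rw [PySem.Dict.getD_insert, if_pos rfl, hsz,
              List.idxOf_append, if_neg hcD]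
          simp

-- sorted2 is sorted under the lexicographic key
theorem pv_sorted2_eq_sorted_lex {α : Type}
    (xs : List α) (k1 : α → Int) (k2 : α → String) :
    PySem.List.sorted2 xs k1 k2 = PySem.List.sorted xs (fun x => toLex (k1 x, k2 x)) := by
  have hbe : (fun a b => decide (k1 a < k1 b) || (!decide (k1 b < k1 a) && decide (k2 a < k2 b)))
      = (fun a b => decide (toLex (k1 a, k2 a) < toLex (k1 b, k2 b))) := by
    funext a b
    rcases lt_trichotomy (k1 a) (k1 b) with h | h | h
    · simp [Prod.Lex.toLex_lt_toLex, h]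
    · simp [Prod.Lex.toLex_lt_toLex, h]
    · simp [Prod.Lex.toLex_lt_toLex, h, not_lt_of_gt h, h.ne']
  show List.foldl (fun acc x => PySem.List.insertBy
        (fun a b => decide (k1 a < k1 b) || (!decide (k1 b < k1 a) && decide (k2 a < k2 b))) x acc) [] xs
      = List.foldl (fun acc x => PySem.List.insertBy
        (fun a b => decide (toLex (k1 a, k2 a) < toLex (k1 b, k2 b))) x acc) [] xs
  rw [hbe]

-- a partition of S by the distinct values of f is a permutation of S
theorem pv_flatMap_filter_perm (f : String → Int) :
    ∀ (D : List Int) (S : List String), D.Nodup → (∀ k ∈ S, f k ∈ D) →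
      (D.flatMap (fun c => S.filter (fun k => decide (f k = c)))).Perm S := by
  intro D
  induction D with
  | nil =>
    intro S _ h
    have : S = [] := by
      cases S with
      | nil => rfl
      | cons x t => exact absurd (h x List.mem_cons_self) (List.not_mem_nil)
    simp [this]
  | cons c D ih =>
    intro S hnd h
    rcases List.nodup_cons.mp hnd with ⟨hcD, hnd'⟩
    simp only [List.flatMap_cons]
    have hrest : D.flatMap (fun c' => S.filter (fun k => decide (f k = c')))
        = D.flatMap (fun c' => (S.filter (fun k => !decide (f k = c))).filter (fun k => decide (f k = c'))) := by
      refine List.flatMap_congr ?_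
      intro c' hc'
      rw [List.filter_filter]
      refine (List.filter_congr ?_).symm
      intro k _
      by_cases hkc : f k = c'
      · have hne : c' ≠ c := fun hcon => hcD (hcon ▸ hc')
        simp [hkc, hne]
      · simp [hkc]
    rw [hrest]
    have hmem' : ∀ k ∈ S.filter (fun k => !decide (f k = c)), f k ∈ D := by
      intro k hk
      rcases List.mem_filter.mp hk with ⟨hkS, hne⟩
      rcases List.mem_cons.mp (h k hkS) with hfc | hfD
      · simp [hfc] at hne
      · exact hfD
    exact List.Perm.trans
      (List.Perm.append_left _ (ih _ hnd' hmem'))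
      (List.filter_append_perm _ S)

-- both ports, written out on a dict with distinct keys (ofList always yields one)
theorem pv_main (d0 : PySem.Dict String (List Int)) (hnodup : d0.keys.Nodup) :
    ((d0.items.foldl
        (fun (st : PySem.Dict String (List Int) × List Int) mokinys =>
          (st.1.modify mokinys.1 [] (fun xs => PySem.List.insert xs 0 (mokinys.2.length : Int)),
           st.2 ++ [(mokinys.2.length : Int)]))
        (d0, ([] : List Int))).2.foldl
      (fun (rez : PySem.Dict String (Int × List Int)) mok_skaicius =>
        (PySem.List.sorted (d0.items.foldl
            (fun (st : PySem.Dict String (List Int) × List Int) mokinys =>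
              (st.1.modify mokinys.1 [] (fun xs => PySem.List.insert xs 0 (mokinys.2.length : Int)),
               st.2 ++ [(mokinys.2.length : Int)]))
            (d0, ([] : List Int))).1.keys (fun k => k)).foldl
          (fun rez i =>
            if PySem.List.pyGetD ((d0.items.foldl
                (fun (st : PySem.Dict String (List Int) × List Int) mokinys =>
                  (st.1.modify mokinys.1 [] (fun xs => PySem.List.insert xs 0 (mokinys.2.length : Int)),
                   st.2 ++ [(mokinys.2.length : Int)]))
                (d0, ([] : List Int))).1.getD i []) 0 0 = mok_skaicius then
              rez.setdefault i (PySem.List.pyGetD ((d0.items.foldl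
                  (fun (st : PySem.Dict String (List Int) × List Int) mokinys =>
                    (st.1.modify mokinys.1 [] (fun xs => PySem.List.insert xs 0 (mokinys.2.length : Int)),
                     st.2 ++ [(mokinys.2.length : Int)]))
                  (d0, ([] : List Int))).1.getD i []) 0 0,
                PySem.List.slice ((d0.items.foldl
                  (fun (st : PySem.Dict String (List Int) × List Int) mokinys =>
                    (st.1.modify mokinys.1 [] (fun xs => PySem.List.insert xs 0 (mokinys.2.length : Int)),
                     st.2 ++ [(mokinys.2.length : Int)]))
                  (d0, ([] : List Int))).1.getD i []) (some 1) none)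
            else rez)
          rez)
      PySem.Dict.empty).items
    = (PySem.List.sorted2 d0.keys
        (fun k => (d0.values.foldl
          (fun rank v =>
            if rank.contains (v.length : Int) then rank
            else rank.insert (v.length : Int) (rank.size : Int))
          PySem.Dict.empty).getD ((d0.getD k []).length : Int) 0)
        (fun k => k)).map
        (fun k => (k, ((d0.getD k []).length : Int), d0.getD k [])) := by
  have hkeys : d0.keys = d0.items.map Prod.fst := rfl
  have hknd : (d0.items.map Prod.fst).Nodup := hkeys ▸ hnodup
  have hval : ∀ p ∈ d0.items, d0.getD p.1 [] = p.2 :=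
    fun p hp => PySem.Dict.getD_of_mem_items d0 hp hnodup []
  -- phase 1 of A: split the two accumulators, name the mutated dict and the counts list
  rw [PySem.List.foldl_prod_mk
      (f := fun (d : PySem.Dict String (List Int)) (q : String × List Int) =>
        d.modify q.1 [] (fun xs => PySem.List.insert xs 0 (q.2.length : Int)))
      (g := fun (sk : List Int) (q : String × List Int) => sk ++ [(q.2.length : Int)])]
  rw [PySem.List.foldl_append_singleton_eq_map, List.nil_append]
  set dfin := d0.items.foldl
      (fun (d : PySem.Dict String (List Int)) (q : String × List Int) =>
        d.modify q.1 [] (fun xs => PySem.List.insert xs 0 (q.2.length : Int))) d0 with hdfin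
  set counts := d0.items.map (fun q => (q.2.length : Int)) with hcounts
  set cnt : String → Int := fun k => ((d0.getD k []).length : Int) with hcnt
  have hdfinK : dfin.keys = d0.keys := by
    have h1 : dfin.keys = PySem.Set.update d0.keys (d0.items.map Prod.fst) :=
      PySem.Dict.keys_foldl_modify_key d0.items Prod.fst []
        (fun _ q => fun xs => PySem.List.insert xs 0 (q.2.length : Int)) d0
    rw [h1, hkeys]
    exact pv_update_of_subset _ _ (fun x hx => hx)
  have hdg : ∀ k ∈ d0.keys, dfin.getD k [] = cnt k :: d0.getD k [] := by
    intro k hk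
    rw [hkeys] at hk
    obtain ⟨p, hp, rfl⟩ := List.mem_map.mp hk
    rw [pv_modfold_getD d0.items d0 hknd hval p hp, hcnt]
    simp only [hval p hp]
  rw [hdfinK]
  set S := PySem.List.sorted d0.keys (fun k => k) with hSdef
  have hSperm : S.Perm d0.keys := PySem.List.sorted_perm d0.keys (fun k => k) false
  have hSsub : ∀ k ∈ S, k ∈ d0.keys := fun k hk => hSperm.mem_iff.mp hk
  have hSnd : S.Nodup := hSperm.nodup_iff.mpr hnodup
  have hSpair : S.Pairwise (· < ·) := by
    have hle : S.Pairwise (fun a b => a ≤ b) := PySem.List.sorted_pairwise d0.keys (fun k => k)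
    have hne : S.Pairwise (fun a b => a ≠ b) := hSnd
    exact (hle.and hne).imp (fun h => lt_of_le_of_ne h.1 h.2)
  -- phase 2 of A: the inner fold only looks at heads and tails of dfin's values
  have hinner : ∀ (rez : PySem.Dict String (Int × List Int)) (c : Int),
      S.foldl (fun rez i =>
          if PySem.List.pyGetD (dfin.getD i []) 0 0 = c then
            rez.setdefault i (PySem.List.pyGetD (dfin.getD i []) 0 0,
                              PySem.List.slice (dfin.getD i []) (some 1) none)
          else rez) rez
        = S.foldl (fun rez i => if cnt i = c then rez.setdefault i (cnt i, d0.getD i []) else rez) rez := by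
    intro rez c
    refine PySem.List.foldl_congr_mem S _ _ rez ?_
    intro acc i hi
    rw [hdg i (hSsub i hi), PySem.List.pyGetD_of_nonneg _ 0 (by norm_num),
        PySem.List.slice_from_one]
    simp
  rw [PySem.List.foldl_congr_mem counts _ _ PySem.Dict.empty (fun acc c _ => hinner acc c)]
  rw [pv_outer cnt (fun k => (cnt k, d0.getD k [])) S hSnd counts [] PySem.Dict.empty
        (by rfl) (by simp [PySem.Dict.contains_empty]),
      PySem.Set.update_nil_left]
  set Dd := PySem.Set.ofList counts with hDd
  have hDdnd : Dd.Nodup := PySem.Set.nodup_ofList counts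
  have hcK : ∀ k ∈ d0.keys, cnt k ∈ Dd := by
    intro k hk
    rw [hkeys] at hk
    obtain ⟨p, hp, rfl⟩ := List.mem_map.mp hk
    rw [hDd, PySem.Set.mem_ofList, hcounts]
    have : cnt p.1 = (p.2.length : Int) := by rw [hcnt]; simp [hval p hp]
    rw [this]
    exact List.mem_map.mpr ⟨p, hp, rfl⟩
  have hcS : ∀ k ∈ S, cnt k ∈ Dd := fun k hk => hcK k (hSsub k hk)
  -- B: the rank fold is the same fold over the counts list
  have hfold : d0.values.foldl
      (fun rank v =>
        if rank.contains (v.length : Int) then rank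
        else rank.insert (v.length : Int) (rank.size : Int))
      PySem.Dict.empty
      = counts.foldl (fun r c => if r.contains c then r else r.insert c (r.size : Int))
          PySem.Dict.empty := by
    have hv : d0.values = d0.items.map Prod.snd := rfl
    rw [hv, List.foldl_map, hcounts, List.foldl_map]
  rw [hfold]
  set rk := counts.foldl (fun r c => if r.contains c then r else r.insert c (r.size : Int))
      PySem.Dict.empty with hrk
  have hrank := pv_rankfold counts PySem.Dict.empty [] List.nodup_nil
      PySem.Dict.keys_empty (by simp)
  rw [PySem.Set.update_nil_left] at hrank
  obtain ⟨hrkK, hrkg⟩ := hrank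
  -- the composite-key sort equals A's count-block concatenation
  have hsort : PySem.List.sorted2 d0.keys
      (fun k => rk.getD ((d0.getD k []).length : Int) 0) (fun k => k)
      = Dd.flatMap (fun c => S.filter (fun k => decide (cnt k = c))) := by
    rw [pv_sorted2_eq_sorted_lex]
    refine PySem.List.sorted_eq_of_perm_of_pairwise_lt _ _ _ ?_ ?_
    · exact (pv_flatMap_filter_perm cnt Dd S hDdnd hcS).trans hSperm
    · have hkey1 : ∀ k ∈ S, rk.getD ((d0.getD k []).length : Int) 0 = ((Dd.idxOf (cnt k) : Nat) : Int) :=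
        fun k hk => hrkg (cnt k) (hcS k hk)
      rw [List.pairwise_flatMap]
      constructor
      · intro c hc
        have base : (S.filter (fun k => decide (cnt k = c))).Pairwise (· < ·) :=
          hSpair.filter _
        refine base.imp_of_mem ?_
        intro a b ha hb hab
        rcases List.mem_filter.mp ha with ⟨haS, hac⟩
        rcases List.mem_filter.mp hb with ⟨hbS, hbc⟩
        have hac' : cnt a = c := of_decide_eq_true hac
        have hbc' : cnt b = c := of_decide_eq_true hbc
        refine Prod.Lex.toLex_lt_toLex.mpr (Or.inr ⟨?_, hab⟩)
        rw [hkey1 a haS, hkey1 b hbS, hac', hbc']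
      · have hpD : Dd.Pairwise (fun c c' => Dd.idxOf c < Dd.idxOf c') := by
          rw [List.pairwise_iff_getElem]
          intro i j hi hj hij
          rw [List.Nodup.idxOf_getElem hDdnd i hi, List.Nodup.idxOf_getElem hDdnd j hj]
          exact hij
        refine hpD.imp_of_mem ?_
        intro c c' hc hc' hlt x hx y hy
        rcases List.mem_filter.mp hx with ⟨hxS, hxc⟩
        rcases List.mem_filter.mp hy with ⟨hyS, hyc⟩
        refine Prod.Lex.toLex_lt_toLex.mpr (Or.inl ?_)
        rw [hkey1 x hxS, hkey1 y hyS, of_decide_eq_true hxc, of_decide_eq_true hyc]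
        show ((Dd.idxOf c : Nat) : Int) < ((Dd.idxOf c' : Nat) : Int)
        exact_mod_cast hlt
  rw [hsort, ← List.map_flatMap]

theorem rusiuoti_spec_aux : ∀ (mok_duom : List (String × List Int)),
    rusiuoti mok_duom = rusiuoti_alt mok_duom := by
  intro md
  dsimp only [rusiuoti, rusiuoti_alt]
  exact pv_main (PySem.Dict.ofList md) (PySem.Dict.nodup_keys_ofList md)

-- ===== VERDICT (by name: the statement is the Claim_ definition above) =====
theorem rusiuoti_spec : Claim_equal_rusiuoti := by
  intro mok_duom _
  exact rusiuoti_spec_aux mok_duom
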